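-- pv_equiv track=rewrite | github.com/diogo-p-nunes/tds | explore-large-collections/.ipynb_checkpoints/utils-checkpoint.py | get_topic_unique_counts
-- ===== SOURCE A (Python) =====
-- def get_topic_unique_counts(topic_top_words):
--     topic_unique_counts = []
--     for i, words in enumerate(topic_top_words):
--         nunique = 0
--         for w in words:
--             is_w_unique = True
--             for other_words in topic_top_words:
--                 if other_words != words and w in other_words:
--                     is_w_unique = False
--                     break
--             if is_w_unique:
--                 nunique += 1
--         topic_unique_counts.append(nunique)
--     return topic_unique_counts
-- ===== SOURCE B (Python) =====
-- def get_topic_unique_counts(topic_top_words):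
--     # One linear pass builds word -> first list containing it; a word becomes
--     # "shared" once a different list containing it is seen. A word is unique to
--     # its topic iff it is not shared.
--     first = {}
--     shared = set()
--     for words in topic_top_words:
--         for w in words:
--             f = first.get(w)
--             if f is None:
--                 first[w] = words
--             elif f != words:
--                 shared.add(w)
--     return [sum(1 for w in words if w not in shared) for words in topic_top_words]
-- ===== Notes on version B (the rewrite author's own statement) =====
-- stated objective: faster
-- what changed: Replaces A's quadruple-nested scan (for each topic, for each word, scan all other topics' word lists) by a single linear pass that indexes each word to the first list containing it and collects a 'shared' set, followed by one counting pass per topic.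
import Mathlib
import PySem

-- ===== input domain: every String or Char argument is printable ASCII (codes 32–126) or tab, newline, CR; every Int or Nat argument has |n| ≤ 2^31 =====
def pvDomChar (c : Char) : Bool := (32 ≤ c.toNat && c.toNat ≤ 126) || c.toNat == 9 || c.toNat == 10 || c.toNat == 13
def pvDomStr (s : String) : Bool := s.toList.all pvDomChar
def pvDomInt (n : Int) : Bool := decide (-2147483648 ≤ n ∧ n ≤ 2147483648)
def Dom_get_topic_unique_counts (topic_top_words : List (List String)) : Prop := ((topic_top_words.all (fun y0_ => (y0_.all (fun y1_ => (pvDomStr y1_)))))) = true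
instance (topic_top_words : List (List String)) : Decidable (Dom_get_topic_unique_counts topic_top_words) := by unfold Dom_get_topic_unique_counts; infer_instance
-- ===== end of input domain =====

-- B replaces A's quadruple-nested scan by one linear indexing pass (word -> first
-- containing list, plus a "shared" set) followed by a per-topic count: a different,
-- asymptotically faster algorithm with the same return value.

-- ===== PORT A =====
-- inner 'for other_words ...: if ...: is_w_unique = False; break' — once the flag is
-- False the loop body can no longer change it, so the fold is exact despite the break
def aUniqueFlag (topic_top_words : List (List String)) (words : List String) (w : String) : Bool :=
  topic_top_words.foldl
    (fun flag other_words =>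
      if flag && (decide (other_words ≠ words) && other_words.contains w) then false else flag)
    true

def get_topic_unique_counts (topic_top_words : List (List String)) : List Int :=
  topic_top_words.foldl
    (fun acc words =>
      acc ++ [words.foldl (fun nunique w => if aUniqueFlag topic_top_words words w then nunique + 1 else nunique) (0 : Int)])
    []

-- ===== PORT B =====
-- body of Source B's inner loop: look w up in `first`; record it or mark it shared
def bInner (words : List String)
    (st : PySem.Dict String (List String) × PySem.Set String) (w : String) :
    PySem.Dict String (List String) × PySem.Set String :=
  match st.1.get? w with
  | none => (st.1.insert w words, st.2)
  | some f => if f ≠ words then (st.1, PySem.Set.add st.2 w) else st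

-- the indexing pass of Source B: first = {}, shared = set()
def bScan (topic_top_words : List (List String)) :
    PySem.Dict String (List String) × PySem.Set String :=
  topic_top_words.foldl
    (fun st words => words.foldl (bInner words) st)
    (PySem.Dict.empty, PySem.Set.empty)

def get_topic_unique_counts_alt (topic_top_words : List (List String)) : List Int :=
  let shared := (bScan topic_top_words).2
  topic_top_words.map
    (fun words => words.foldl (fun n w => if PySem.Set.contains shared w then n else n + 1) (0 : Int))

-- ===== PRECONDITION & SPEC =====
def Spec_get_topic_unique_counts (topic_top_words : List (List String)) (out : List Int) : Prop := out = get_topic_unique_counts_alt topic_top_words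
instance (topic_top_words : List (List String)) (out : List Int) : Decidable (Spec_get_topic_unique_counts topic_top_words out) := by unfold Spec_get_topic_unique_counts; infer_instance

-- ===== CLAIM (what is proved, stated in full; the proofs are below) =====
def Claim_equal_get_topic_unique_counts : Prop := ∀ (topic_top_words : List (List String)), Dom_get_topic_unique_counts topic_top_words → Spec_get_topic_unique_counts topic_top_words (get_topic_unique_counts topic_top_words)

-- ===== LEMMAS AND PROOFS =====

-- the first list of P containing w (spec of Source B's `first` dict)
def firstC (P : List (List String)) (w : String) : Option (List String) :=
  P.find? (fun L => L.contains w)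

-- w occurs in some list of P other than the first list of P containing it
def badP (P : List (List String)) (w : String) : Prop :=
  ∃ L ∈ P, w ∈ L ∧ firstC P w ≠ some L

-- A's inner flag loop is the negated `any`
theorem foldl_flag (c : List String → Bool) (l : List (List String)) (b : Bool) :
    l.foldl (fun flag ow => if flag && c ow then false else flag) b = (b && !l.any c) := by
  induction l generalizing b with
  | nil => simp
  | cons x xs ih =>
    simp only [List.foldl_cons, List.any_cons]
    rw [ih]
    cases b <;> cases hc : c x <;> simp

theorem aUniqueFlag_eq (tt : List (List String)) (words : List String) (w : String) :
    aUniqueFlag tt words w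
      = !(tt.any fun ow => decide (ow ≠ words) && ow.contains w) := by
  unfold aUniqueFlag
  rw [foldl_flag]
  simp

-- value of Source B's `first` dict during the inner loop: `seen` marks the words of the
-- current list already processed
def gfun (P : List (List String)) (words : List String) (seen : String → Bool)
    (x : String) : Option (List String) :=
  match firstC P x with
  | some F => some F
  | none => if seen x then some words else none

-- contents of Source B's `shared` set during the inner loop
def cProp (P : List (List String)) (words : List String) (seen : String → Bool)
    (x : String) : Prop :=
  badP P x ∨ (seen x = true ∧ ∃ F, firstC P x = some F ∧ F ≠ words)

theorem bInner_inv (P : List (List String)) (words : List String)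
    (ws : List String) (seen : String → Bool)
    (st : PySem.Dict String (List String) × PySem.Set String)
    (hd : ∀ x, st.1.get? x = gfun P words seen x)
    (hs : ∀ x, x ∈ st.2 ↔ cProp P words seen x) :
    (∀ x, (ws.foldl (bInner words) st).1.get? x
        = gfun P words (fun x => seen x || decide (x ∈ ws)) x) ∧
    (∀ x, x ∈ (ws.foldl (bInner words) st).2
        ↔ cProp P words (fun x => seen x || decide (x ∈ ws)) x) := by
  induction ws generalizing seen st with
  | nil => simpa [gfun, cProp] using ⟨hd, hs⟩
  | cons w ws ih =>
    simp only [List.foldl_cons]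
    have key :
        (∀ x, (bInner words st w).1.get? x
            = gfun P words (fun x => seen x || decide (x = w)) x) ∧
        (∀ x, x ∈ (bInner words st w).2
            ↔ cProp P words (fun x => seen x || decide (x = w)) x) := by
      rcases h1 : firstC P w with _ | F
      · by_cases hw : seen w = true
        · -- w unseen in P but already inserted from this list: no-op
          have hstep : bInner words st w = st := by
            unfold bInner; rw [hd w]; unfold gfun; rw [h1]; simp [hw]
          rw [hstep]
          refine ⟨fun x => ?_, fun x => ?_⟩
          · rw [hd x]; unfold gfun
            rcases firstC P x with _ | G
            · by_cases hxw : x = w <;> simp [hxw, hw]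
            · simp
          · rw [hs x]; unfold cProp
            by_cases hxw : x = w <;> simp [hxw, hw, h1]
        · -- fresh word: first[w] = words
          simp only [Bool.not_eq_true] at hw
          have hstep : bInner words st w = (st.1.insert w words, st.2) := by
            unfold bInner; rw [hd w]; unfold gfun; rw [h1]; simp [hw]
          rw [hstep]
          refine ⟨fun x => ?_, fun x => ?_⟩
          · show (st.1.insert w words).get? x = _
            rw [PySem.Dict.get?_insert]
            unfold gfun
            by_cases hxw : x = w
            · subst hxw; simp [h1]
            · simp only [if_neg hxw]; rw [hd x]; unfold gfun
              rcases firstC P x with _ | G <;> simp [hxw]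
          · show x ∈ st.2 ↔ _
            rw [hs x]; unfold cProp
            by_cases hxw : x = w <;> simp [hxw, hw, h1]
      · by_cases hF : F = words
        · -- first[w] is this very list: no-op
          have hstep : bInner words st w = st := by
            unfold bInner; rw [hd w]; unfold gfun; rw [h1]; simp [hF]
          rw [hstep]
          refine ⟨fun x => ?_, fun x => ?_⟩
          · rw [hd x]; unfold gfun
            rcases h2 : firstC P x with _ | G
            · by_cases hxw : x = w
              · subst hxw; rw [h2] at h1; cases h1
              · simp [hxw]
            · simp
          · rw [hs x]; unfold cProp
            by_cases hxw : x = w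
            · subst hxw; simp [h1, hF]
            · simp [hxw]
        · -- a different list already contains w: shared.add(w)
          have hstep : bInner words st w = (st.1, PySem.Set.add st.2 w) := by
            unfold bInner; rw [hd w]; unfold gfun; rw [h1]; simp [hF]
          rw [hstep]
          refine ⟨fun x => ?_, fun x => ?_⟩
          · rw [hd x]; unfold gfun
            rcases h2 : firstC P x with _ | G
            · by_cases hxw : x = w
              · subst hxw; rw [h2] at h1; cases h1
              · simp [hxw]
            · simp
          · show x ∈ PySem.Set.add st.2 w ↔ _
            rw [PySem.Set.mem_add, hs x]; unfold cProp
            by_cases hxw : x = w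
            · subst hxw; simp [h1, hF]
            · simp [hxw]
    have h := ih (fun x => seen x || decide (x = w)) (bInner words st w) key.1 key.2
    refine ⟨fun x => ?_, fun x => ?_⟩
    · rw [h.1 x]
      unfold gfun
      rcases firstC P x with _ | F
      · simp [List.mem_cons, Bool.or_assoc]
      · simp
    · rw [h.2 x]
      unfold cProp
      simp [List.mem_cons, Bool.or_assoc]

theorem firstC_append (tt : List (List String)) (L : List String) (x : String) :
    firstC (tt ++ [L]) x
      = match firstC tt x with
        | some F => some F
        | none => if x ∈ L then some L else none := by
  unfold firstC
  rw [List.find?_append]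
  rcases h : tt.find? (fun L => L.contains x) with _ | F <;> rw [h]
  · by_cases hxL : x ∈ L <;>
      simp [List.find?, hxL]
  · simp

theorem badP_append (tt : List (List String)) (L : List String) (x : String) :
    badP (tt ++ [L]) x ↔ cProp tt L (fun x => decide (x ∈ L)) x := by
  unfold badP cProp
  rcases h1 : firstC tt x with _ | F
  · -- x occurs in no list of tt
    have hnone : ∀ M ∈ tt, x ∉ M := by
      intro M hM
      have := (List.find?_eq_none.mp h1) M hM
      simpa [List.contains_iff_mem] using this
    constructor
    · rintro ⟨M, hM, hxM, hne⟩
      rcases List.mem_append.mp hM with h | h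
      · exact absurd hxM (hnone M h)
      · simp only [List.mem_singleton] at h; subst h
        rw [firstC_append, h1] at hne
        simp [hxM] at hne
    · rintro (⟨M, hM, hxM, _⟩ | ⟨_, F, hF, _⟩)
      · exact absurd hxM (hnone M hM)
      · cases hF
  · have hF' : firstC (tt ++ [L]) x = some F := by rw [firstC_append, h1]
    constructor
    · rintro ⟨M, hM, hxM, hne⟩
      rw [hF'] at hne
      rcases List.mem_append.mp hM with h | h
      · exact Or.inl ⟨M, h, hxM, by rw [h1]; simpa using hne⟩
      · simp only [List.mem_singleton] at h; subst h
        exact Or.inr ⟨by simpa using hxM, F, rfl, fun hFL => hne (by rw [hFL])⟩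
    · rintro (⟨M, hM, hxM, hne⟩ | ⟨hxL, G, hG, hGL⟩)
      · exact ⟨M, List.mem_append.mpr (Or.inl hM), hxM,
          by rw [hF']; rw [h1] at hne; simpa using hne⟩
      · injection hG with hG; subst hG
        exact ⟨L, List.mem_append.mpr (Or.inr (List.mem_singleton.mpr rfl)),
          by simpa using hxL, by rw [hF']; simpa using hGL⟩

theorem bScan_inv (tt : List (List String)) :
    (∀ x, (bScan tt).1.get? x = firstC tt x) ∧
    (∀ x, x ∈ (bScan tt).2 ↔ badP tt x) := by
  induction tt using List.reverseRecOn with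
  | nil =>
    constructor
    · intro x; simp [bScan, firstC, PySem.Dict.get?_empty]
    · intro x
      simp only [bScan, List.foldl_nil]
      constructor
      · intro h; cases h
      · rintro ⟨M, hM, -, -⟩; cases hM
  | append_singleton tt L ih =>
    have hfold : bScan (tt ++ [L]) = L.foldl (bInner L) (bScan tt) := by
      unfold bScan; rw [List.foldl_append]; simp only [List.foldl_cons, List.foldl_nil]
    have hd : ∀ x, (bScan tt).1.get? x = gfun tt L (fun _ => false) x := by
      intro x; rw [ih.1 x]; unfold gfun
      rcases firstC tt x with _ | F <;> simp
    have hs : ∀ x, x ∈ (bScan tt).2 ↔ cProp tt L (fun _ => false) x := by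
      intro x; rw [ih.2 x]; unfold cProp; simp
    have main := bInner_inv tt L L (fun _ => false) (bScan tt) hd hs
    rw [hfold]
    constructor
    · intro x
      rw [main.1 x, firstC_append]
      unfold gfun
      rcases firstC tt x with _ | F <;> simp
    · intro x
      rw [main.2 x, badP_append]
      unfold cProp
      simp

-- the pointwise bridge: for w in its own topic, A's uniqueness flag is the negation
-- of membership in Source B's `shared` set
theorem flag_eq_not_bad (tt : List (List String)) (words : List String) (w : String)
    (hwords : words ∈ tt) (hw : w ∈ words) :
    aUniqueFlag tt words w = !(PySem.Set.contains (bScan tt).2 w) := by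
  have hmemset := (bScan_inv tt).2 w
  have hcontIff : (PySem.Set.contains (bScan tt).2 w = true) ↔ badP tt w := by
    simpa [PySem.Set.contains, List.contains_iff_mem] using hmemset
  rw [aUniqueFlag_eq]
  have hmem : (tt.any fun ow => decide (ow ≠ words) && ow.contains w) = true
      ↔ ∃ ow ∈ tt, ow ≠ words ∧ w ∈ ow := by
    simp [List.any_eq_true]
  -- firstC tt w is some F with w ∈ F, F ∈ tt
  obtain ⟨F, hF⟩ : ∃ F, firstC tt w = some F := by
    rcases h : firstC tt w with _ | F
    · exact absurd (by simpa [List.contains_iff_mem] using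
        List.find?_eq_none.mp h words hwords) (by simp [hw])
    · exact ⟨F, rfl⟩
  have hFtt : F ∈ tt := List.mem_of_find?_eq_some hF
  have hwF : w ∈ F := by simpa [List.contains_iff_mem] using List.find?_some hF
  have hiff : (∃ ow ∈ tt, ow ≠ words ∧ w ∈ ow) ↔ badP tt w := by
    constructor
    · rintro ⟨ow, how, hne, hwow⟩
      by_cases howF : ow = F
      · subst howF
        exact ⟨words, hwords, hw, by rw [hF]; intro h; exact hne (Option.some.inj h)⟩
      · exact ⟨ow, how, hwow, by rw [hF]; intro h; exact howF (Option.some.inj h).symm⟩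
    · rintro ⟨M, hM, hwM, hne⟩
      by_cases hMw : M = words
      · subst hMw
        refine ⟨F, hFtt, ?_, hwF⟩
        intro hFw; rw [hF] at hne; exact hne (by rw [hFw])
      · exact ⟨M, hM, hMw, hwM⟩
  congr 1
  rw [Bool.eq_iff_iff, hmem, hcontIff]
  exact hiff

-- ===== VERDICT (by name: the statement is the Claim_ definition above) =====
theorem get_topic_unique_counts_spec : Claim_equal_get_topic_unique_counts := by
  intro tt _
  show get_topic_unique_counts tt = get_topic_unique_counts_alt tt
  unfold get_topic_unique_counts get_topic_unique_counts_alt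
  rw [PySem.List.foldl_append_singleton_eq_map, List.nil_append]
  refine List.map_congr_left (fun words hwords => ?_)
  refine PySem.List.foldl_congr_mem' _ _ _ _ (fun w hw n => ?_)
  rw [flag_eq_not_bad tt words w hwords hw]
  cases PySem.Set.contains (bScan tt).2 w <;> simp
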